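-- pv_equiv track=rewrite | github.com/SpCoGov/shanten-lens | backend/bot/logic/handmap.py | screen_slot_indices_from_hand
-- ===== SOURCE A (Python) =====
-- from typing import Dict, List, Tuple
--
-- _SUIT_WEIGHT = {"bd": -1, "m": 0, "p": 1, "s": 2, "z": 3}
--
-- def _tile_key(label: str) -> Tuple[int, int]:
--     """
--     把牌面字符串映射到排序键：
--       - "bd"   -> 最左（不可打）
--       - "1m9m" -> 1..9，红五用 '0m'，排在 4 之后 5 之前
--       - "1p..9p"，'0p' 在 4 之后
--       - "1s..9s"，'0s' 在 4 之后
--       - "1z..7z"  字牌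
--     返回 (大类序, 同类内序)
--     """
--     if label == "bd":
--         return _SUIT_WEIGHT["bd"], -999
--
--     if len(label) != 2:
--         # 容错：未知格式，放到最后
--         return 999, 999
--
--     rank_ch, suit = label[0], label[1]
--     if suit not in ("m", "p", "s", "z"):
--         return 999, 999
--
--     suit_w = _SUIT_WEIGHT[suit]
--
--     # 字牌：1z..7z
--     if suit == "z":
--         if rank_ch.isdigit():
--             r = int(rank_ch)
--             return suit_w, r
--         return suit_w, 99
--
--     # 数牌：1..9，红五 0*
--     if rank_ch == "0":
--         # 红五介于 4 与 5 之间，设为 45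
--         r = 45
--     elif rank_ch.isdigit():
--         r = int(rank_ch) * 10  # *10 让 45 能插在 40 和 50 之间
--     else:
--         r = 999
--
--     return suit_w, r
--
-- def sort_hand_labels(hand_labels: List[str]) -> List[str]:
--     """
--     按你给的规则对 13 张“可排序部分”排序（不含最后一张摸牌）。
--     注意：这个函数不处理“最后一张摸牌”逻辑。外层需要把最后一张保留在末尾。
--     """
--     return sorted(hand_labels, key=_tile_key)
--
-- def screen_slot_indices_from_hand(hand_labels_with_draw: List[str]) -> List[int]:
--     """
--     给出屏幕显示的槽位索引（0..N-1），对应传入的每一张牌的“屏幕位置”。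
--     规则：
--       - 输入 hand_labels_with_draw 的最后一个元素视为“摸进来的牌”，永远放在最右侧
--       - 其余 N-1 张按 sort_hand_labels 的规则在左侧从左到右排序
--     返回：与输入等长的数组，元素是该牌应在的槽位索引
--     """
--     n = len(hand_labels_with_draw)
--     if n == 0:
--         return []
--     if n == 1:
--         return [0]
--
--     # 拆分：左侧可排序部分 + 末尾摸牌
--     left = hand_labels_with_draw[:-1]
--     draw = hand_labels_with_draw[-1]
--
--     left_sorted = sort_hand_labels(left)
--     # 构造“目标屏幕顺序”
--     target = left_sorted + [draw]
--
--     # 为了处理重复牌，对每个 label 建“出现次序”索引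
--     def enumerate_positions(seq: List[str]):
--         pos_map = {}
--         out = []
--         for s in seq:
--             k = (s, pos_map.get(s, 0))
--             pos_map[s] = pos_map.get(s, 0) + 1
--             out.append(k)
--         return out
--
--     src_tags = enumerate_positions(hand_labels_with_draw)
--     tgt_tags = enumerate_positions(target)
--
--     # 建立从 src 每张到 tgt 的对应位置
--     from collections import defaultdict, deque
--     buckets = defaultdict(deque)
--     for idx_t, tag in enumerate(tgt_tags):
--         buckets[tag].append(idx_t)
--
--     slot_idx = [0] * n
--     for idx_s, tag in enumerate(src_tags):
--         slot_idx[idx_s] = buckets[tag].popleft()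
--
--     return slot_idx
-- ===== SOURCE B (Python) =====
-- from typing import Tuple
--
-- _SUIT_WEIGHT = {"bd": -1, "m": 0, "p": 1, "s": 2, "z": 3}
--
-- def _tile_key(label: str) -> Tuple[int, int]:
--     if label == "bd":
--         return _SUIT_WEIGHT["bd"], -999
--     if len(label) != 2:
--         return 999, 999
--     rank_ch, suit = label[0], label[1]
--     if suit not in ("m", "p", "s", "z"):
--         return 999, 999
--     suit_w = _SUIT_WEIGHT[suit]
--     if suit == "z":
--         if rank_ch.isdigit():
--             return suit_w, int(rank_ch)
--         return suit_w, 99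
--     if rank_ch == "0":
--         r = 45
--     elif rank_ch.isdigit():
--         r = int(rank_ch) * 10
--     else:
--         r = 999
--     return suit_w, r
--
-- def screen_slot_indices_from_hand(hand_labels_with_draw):
--     # Counting ranks directly: a tile's screen slot is the number of tiles that
--     # must sit to its left (strictly smaller key, or equal key and earlier in
--     # the hand -- which is exactly what a stable sort produces). The draw stays
--     # pinned at slot n-1. No sorting, no tagging, no buckets.
--     n = len(hand_labels_with_draw)
--     if n == 0:
--         return []
--     if n == 1:
--         return [0]
--     keys = [_tile_key(s) for s in hand_labels_with_draw[:-1]]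
--     out = []
--     for i, ki in enumerate(keys):
--         slot = 0
--         for j, kj in enumerate(keys):
--             if kj < ki or (kj == ki and j < i):
--                 slot += 1
--         out.append(slot)
--     out.append(n - 1)
--     return out
-- ===== Notes on version B (the rewrite author's own statement) =====
-- stated objective: alternative
-- what changed: Replaces sort + occurrence-tagging + defaultdict-of-deques bucket matching by a direct stable-rank count: each left tile's slot is the number of tiles with a strictly smaller key or an equal key earlier in the hand, and the draw is pinned at slot n-1; no sorting, no tags, no buckets.
import Mathlib
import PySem

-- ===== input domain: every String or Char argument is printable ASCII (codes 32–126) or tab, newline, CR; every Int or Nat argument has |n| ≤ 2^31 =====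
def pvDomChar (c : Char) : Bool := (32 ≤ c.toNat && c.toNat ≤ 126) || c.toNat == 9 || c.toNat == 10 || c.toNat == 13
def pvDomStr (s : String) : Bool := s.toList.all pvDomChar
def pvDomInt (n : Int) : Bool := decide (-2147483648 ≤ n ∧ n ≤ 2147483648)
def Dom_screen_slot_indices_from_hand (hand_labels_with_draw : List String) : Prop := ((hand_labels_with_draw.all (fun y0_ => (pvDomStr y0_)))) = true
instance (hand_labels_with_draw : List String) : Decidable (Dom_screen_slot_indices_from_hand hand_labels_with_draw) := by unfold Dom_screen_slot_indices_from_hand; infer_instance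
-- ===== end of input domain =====

-- B replaces A's sort + occurrence-tagging + bucket matching by a direct stable-rank
-- count (slot = #tiles with smaller key, or equal key and earlier position); same values,
-- different algorithm (objective: alternative, not faster).

-- ===== PORT A =====
-- _tile_key (shared helper: both Pythons contain the identical _tile_key)
def tileKey (label : String) : Int × Int :=
  if label = "bd" then (-1, -999)
  else if PySem.Str.len label ≠ 2 then (999, 999)
  else
    match label.toList with
    | [rankCh, suit] =>
      if ¬ (suit = 'm' ∨ suit = 'p' ∨ suit = 's' ∨ suit = 'z') then (999, 999)
      else
        let suitW : Int := if suit = 'm' then 0 else if suit = 'p' then 1 else if suit = 's' then 2 else 3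
        if suit = 'z' then
          -- rank_ch.isdigit() / int(rank_ch) on the single character (exact on ASCII);
          -- the getD 0 default is unreachable: guarded by isdigit
          if PySem.Chars.isdigit rankCh then (suitW, (PySem.Int.ofChars? [rankCh]).getD 0) else (suitW, 99)
        else
          if rankCh = '0' then (suitW, 45)
          else if PySem.Chars.isdigit rankCh then (suitW, (PySem.Int.ofChars? [rankCh]).getD 0 * 10)
          else (suitW, 999)
    | _ => (999, 999)  -- unreachable: the len-2 guard above ensures exactly two characters

-- enumerate_positions (inner helper of A)
def epTags (seq : List String) : List (String × Int) :=
  (seq.foldl (fun (st : PySem.Dict String Int × List (String × Int)) s =>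
      let c := st.1.getD s 0
      (st.1.insert s (c + 1), st.2 ++ [(s, c)]))
    (PySem.Dict.empty, [])).2

-- sort_hand_labels
def sortHandLabels (hand_labels : List String) : List String :=
  PySem.List.sorted2 hand_labels (fun l => (tileKey l).1) (fun l => (tileKey l).2)

def screen_slot_indices_from_hand (hand_labels_with_draw : List String) : List Int :=
  let n := hand_labels_with_draw.length
  if n = 0 then []
  else if n = 1 then [0]
  else
    let left := PySem.List.slice hand_labels_with_draw none (some (-1))
    let draw := PySem.List.pyGetD hand_labels_with_draw (-1) ""   -- xs[-1]; n ≥ 1, in range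
    let left_sorted := sortHandLabels left
    let target := left_sorted ++ [draw]
    let src_tags := epTags hand_labels_with_draw
    let tgt_tags := epTags target
    let buckets := (PySem.List.enumerate tgt_tags).foldl
        (fun (b : PySem.Dict (String × Int) (List Int)) p => b.insert p.2 (b.getD p.2 [] ++ [p.1]))
        PySem.Dict.empty
    let final := (PySem.List.enumerate src_tags).foldl
        (fun (st : PySem.Dict (String × Int) (List Int) × List Int) p =>
          let q := st.1.getD p.2 []
          -- q.popleft(): q is non-empty at every reachable step (src and tgt tags are
          -- permutations of each other), so the two defaults below are never used
          (st.1.insert p.2 q.tail, st.2.set p.1.toNat (q.headD 0)))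
        (buckets, List.replicate n 0)
    final.2

-- ===== PORT B =====
def screen_slot_indices_from_hand_alt (hand_labels_with_draw : List String) : List Int :=
  let n := hand_labels_with_draw.length
  if n = 0 then []
  else if n = 1 then [0]
  else
    let keys := (PySem.List.slice hand_labels_with_draw none (some (-1))).map tileKey
    let out := (PySem.List.enumerate keys).foldl
      (fun (out : List Int) p =>
        let slot := (PySem.List.enumerate keys).foldl
          (fun (slot : Int) q =>
            -- Python tuple comparison 'kj < ki' is lexicographic: ported as toLex < toLex
            if toLex q.2 < toLex p.2 ∨ (q.2 = p.2 ∧ q.1 < p.1) then slot + 1 else slot)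
          0
        out ++ [slot]) []
    out ++ [(n : Int) - 1]

-- ===== PRECONDITION & SPEC =====
def Spec_screen_slot_indices_from_hand (hand_labels_with_draw : List String) (out : List Int) : Prop := out = screen_slot_indices_from_hand_alt hand_labels_with_draw
instance (hand_labels_with_draw : List String) (out : List Int) : Decidable (Spec_screen_slot_indices_from_hand hand_labels_with_draw out) := by unfold Spec_screen_slot_indices_from_hand; infer_instance

-- ===== CLAIM (what is proved, stated in full; the proofs are below) =====
def Claim_equal_screen_slot_indices_from_hand : Prop := ∀ (hand_labels_with_draw : List String), Dom_screen_slot_indices_from_hand hand_labels_with_draw → Spec_screen_slot_indices_from_hand hand_labels_with_draw (screen_slot_indices_from_hand hand_labels_with_draw)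

-- ===== LEMMAS AND PROOFS =====

-- the lexicographic sort key of a label, and the tie-broken (stable) key of an indexed label
def encKey (s : String) : Lex (Int × Int) := toLex (tileKey s)
def KK (p : String × Nat) : Lex (Lex (Int × Int) × Nat) := toLex (encKey p.1, p.2)

-- occurrence tags of a sequence, as a pure function (what enumerate_positions computes)
def occTags (L : List String) : List (String × Int) :=
  L.zipIdx.map (fun p => (p.1, ((L.take p.2).count p.1 : Int)))

-- the stably sorted, index-decorated left hand
def dsOf (L : List String) : List (String × Nat) :=
  PySem.List.sorted L.zipIdx KK false

theorem length_occTags (L : List String) : (occTags L).length = L.length := by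
  simp [occTags]

theorem getElem_occTags (L : List String) (i : Nat) (hi : i < L.length)
    (h' : i < (occTags L).length) :
    (occTags L)[i] = (L[i], ((L.take i).count L[i] : Int)) := by
  simp [occTags]

theorem occTags_append (L : List String) (x : String) :
    occTags (L ++ [x]) = occTags L ++ [(x, (L.count x : Int))] := by
  unfold occTags
  rw [List.zipIdx_append, List.map_append]
  congr 1
  · apply List.map_congr_left
    intro p hp
    obtain ⟨s, i⟩ := p
    obtain ⟨-, h2, -⟩ := List.mem_zipIdx hp
    rw [List.take_append_of_le_length (by omega)]
  · simp [List.take_append_of_le_length (le_refl L.length)]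


theorem mem_occTags (L : List String) (s : String) (c : Int) :
    (s, c) ∈ occTags L ↔ 0 ≤ c ∧ c < (L.count s : Int) := by
  induction L using List.reverseRecOn with
  | nil => simp [occTags]
  | append_singleton L x ih =>
    rw [occTags_append]
    simp only [List.mem_append, List.mem_singleton, ih, Prod.mk.injEq, List.count_append,
      List.count_singleton]
    by_cases hx : s = x
    · subst hx
      simp only [beq_self_eq_true, if_true, true_and]
      push_cast
      constructor
      · rintro (⟨h0, h1⟩ | rfl) <;> omega
      · rintro ⟨h0, h1⟩
        by_cases hc : c = (List.count s L : Int)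
        · right; exact hc
        · left; exact ⟨h0, by omega⟩
    · have hbe : (x == s) = false := beq_false_of_ne (Ne.symm hx)
      simp [hbe, hx]

theorem nodup_occTags (L : List String) : (occTags L).Nodup := by
  induction L using List.reverseRecOn with
  | nil => simp [occTags]
  | append_singleton L x ih =>
    rw [occTags_append]
    refine List.Nodup.append ih (List.nodup_singleton _) ?_
    intro a ha hb
    simp only [List.mem_singleton] at hb
    subst hb
    rw [mem_occTags] at ha
    omega


theorem occTags_perm {L₁ L₂ : List String} (h : L₁.Perm L₂) :
    (occTags L₁).Perm (occTags L₂) := by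
  rw [List.perm_ext_iff_of_nodup (nodup_occTags _) (nodup_occTags _)]
  rintro ⟨s, c⟩
  rw [mem_occTags, mem_occTags, h.count_eq]


theorem epTags_aux (rest : List String) :
    ∀ (d : PySem.Dict String Int) (out : List (String × Int)) (P : List String),
    (∀ s, d.getD s 0 = (P.count s : Int)) → out = occTags P →
    (rest.foldl (fun (st : PySem.Dict String Int × List (String × Int)) s =>
        let c := st.1.getD s 0
        (st.1.insert s (c + 1), st.2 ++ [(s, c)])) (d, out)).2
      = occTags (P ++ rest) := by
  induction rest with
  | nil => intro d out P hc ho; simpa using ho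
  | cons s rest ih =>
    intro d out P hc ho
    rw [List.foldl_cons]
    have step := ih (d.insert s (d.getD s 0 + 1)) (out ++ [(s, d.getD s 0)]) (P ++ [s]) ?_ ?_
    · rw [step]; simp
    · intro s'
      rw [PySem.Dict.getD_insert]
      by_cases h : s' = s
      · subst h
        rw [if_pos rfl, hc, List.count_append, List.count_singleton]
        simp
      · rw [if_neg h, hc, List.count_append]
        have : List.count s' [s] = 0 := by
          rw [List.count_singleton]
          simp [beq_false_of_ne (Ne.symm h)]
        rw [this]
        simp
    · rw [ho, occTags_append, hc]

theorem epTags_eq_occTags (L : List String) : epTags L = occTags L := by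
  unfold epTags
  have := epTags_aux L PySem.Dict.empty [] [] ?_ ?_
  · simpa using this
  · intro s
    simp [PySem.Dict.getD, PySem.Dict.get?_empty]
  · simp [occTags]


theorem enumerate_eq_zipIdx {α : Type} (xs : List α) (m : Nat) :
    PySem.List.enumerate xs (m : Int) = (xs.zipIdx m).map (fun p => ((p.2 : Int), p.1)) := by
  induction xs generalizing m with
  | nil => rfl
  | cons x t ih =>
    have hc : ((m : Int) + 1) = ((m + 1 : Nat) : Int) := by push_cast; ring
    rw [show PySem.List.enumerate (x :: t) (m : Int)
          = ((m : Int), x) :: PySem.List.enumerate t ((m : Int) + 1) from rfl,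
        hc, ih, List.zipIdx_cons, List.map_cons]


theorem map_fst_zipIdx {α : Type} (L : List α) (k : Nat) : (L.zipIdx k).map Prod.fst = L := by
  induction L generalizing k with
  | nil => rfl
  | cons x t ih => rw [List.zipIdx_cons, List.map_cons]; exact congrArg _ (ih (k + 1))


theorem insertBy_congr {α : Type} (b b' : α → α → Bool) (x : α) (ys : List α)
    (h : ∀ y ∈ ys, b x y = b' x y) :
    PySem.List.insertBy b x ys = PySem.List.insertBy b' x ys := by
  induction ys with
  | nil => rfl
  | cons y ys ih =>
    show (if b x y then x :: y :: ys else y :: PySem.List.insertBy b x ys)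
       = (if b' x y then x :: y :: ys else y :: PySem.List.insertBy b' x ys)
    rw [h y (by simp), ih (fun z hz => h z (by simp [hz]))]


theorem insertBy_map {α β : Type} (b : β → β → Bool) (g : α → β) (x : α) (ys : List α) :
    PySem.List.insertBy b (g x) (ys.map g)
      = (PySem.List.insertBy (fun a c => b (g a) (g c)) x ys).map g := by
  induction ys with
  | nil => rfl
  | cons y ys ih =>
    show (if b (g x) (g y) then g x :: g y :: ys.map g else g y :: PySem.List.insertBy b (g x) (ys.map g))
       = ((if b (g x) (g y) then x :: y :: ys else y :: PySem.List.insertBy _ x ys).map g)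
    split <;> simp [ih]


-- A's sort (tuple key) is the sort by the lexicographic key encKey
theorem sortHandLabels_eq_sorted (L : List String) :
    sortHandLabels L = PySem.List.sorted L encKey false := by
  unfold sortHandLabels
  show List.foldl (fun acc x => PySem.List.insertBy _ x acc) [] L = _
  rw [PySem.List.sorted_eq_foldl_insertBy]
  have hb : (fun a b => decide ((tileKey a).1 < (tileKey b).1)
        || (!decide ((tileKey b).1 < (tileKey a).1) && decide ((tileKey a).2 < (tileKey b).2)))
      = fun a b : String => decide (encKey a < encKey b) := by
    funext a b
    apply Bool.eq_iff_iff.mpr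
    simp only [encKey, Prod.Lex.toLex_lt_toLex, Bool.or_eq_true, Bool.and_eq_true,
      Bool.not_eq_true', decide_eq_true_eq, decide_eq_false_iff_not]
    omega
  rw [hb]
  rfl

-- sorting commutes with map (insertion sort compares only keys)
theorem sorted_map {α β κ : Type} [LT κ] [DecidableLT κ] (g : α → β) (key : β → κ) (l : List α) :
    PySem.List.sorted (l.map g) key false
      = (PySem.List.sorted l (fun x => key (g x)) false).map g := by
  rw [PySem.List.sorted_eq_foldl_insertBy, PySem.List.sorted_eq_foldl_insertBy]
  suffices h : ∀ (acc : List α),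
      (l.map g).foldl (fun acc x => PySem.List.insertBy (fun a b => decide (key a < key b)) x acc) (acc.map g)
        = (l.foldl (fun acc x => PySem.List.insertBy (fun a b => decide (key (g a) < key (g b))) x acc) acc).map g by
    simpa using h []
  induction l with
  | nil => intro acc; rfl
  | cons x t ih =>
    intro acc
    rw [List.map_cons, List.foldl_cons, List.foldl_cons, insertBy_map]
    exact ih _

theorem zipIdx_pairwise_snd {α : Type} (L : List α) (k : Nat) :
    (L.zipIdx k).Pairwise (fun a b => a.2 < b.2) := by
  rw [List.pairwise_iff_getElem]
  intro i j hi hj hij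
  simp only [List.getElem_zipIdx]
  omega

-- stability: on an index-decorated list with increasing indices, sorting by the key alone
-- equals sorting by the key with the index as a tie-break
theorem stab_aux (l : List (String × Nat)) :
    ∀ acc : List (String × Nat),
    l.Pairwise (fun a b => a.2 < b.2) →
    (∀ y ∈ acc, ∀ x ∈ l, y.2 < x.2) →
    l.foldl (fun acc x => PySem.List.insertBy (fun a b => decide (encKey a.1 < encKey b.1)) x acc) acc
      = l.foldl (fun acc x => PySem.List.insertBy (fun a b => decide (KK a < KK b)) x acc) acc := by
  induction l with
  | nil => intro _ _ _; rfl
  | cons x t ih =>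
    intro acc hpw hacc
    rw [List.foldl_cons, List.foldl_cons]
    have h1 : PySem.List.insertBy (fun a b => decide (encKey a.1 < encKey b.1)) x acc
        = PySem.List.insertBy (fun a b => decide (KK a < KK b)) x acc := by
      apply insertBy_congr
      intro y hy
      have hyx : y.2 < x.2 := hacc y hy x (by simp)
      apply Bool.eq_iff_iff.mpr
      simp only [KK, Prod.Lex.toLex_lt_toLex, decide_eq_true_eq]
      constructor
      · intro h; exact Or.inl h
      · rintro (h | ⟨-, h⟩)
        · exact h
        · omega
    rw [h1]
    apply ih
    · exact hpw.of_cons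
    · intro y hy x' hx'
      rcases (PySem.List.mem_insertBy _ _ _ _).mp hy with rfl | hy'
      · exact (List.pairwise_cons.mp hpw).1 x' hx'
      · exact hacc y hy' x' (List.mem_cons_of_mem _ hx')

theorem sorted_zipIdx_stable (L : List String) :
    PySem.List.sorted L.zipIdx (fun p => encKey p.1) false = dsOf L := by
  unfold dsOf
  rw [PySem.List.sorted_eq_foldl_insertBy, PySem.List.sorted_eq_foldl_insertBy]
  exact stab_aux L.zipIdx [] (zipIdx_pairwise_snd L 0) (by intro y hy; simp at hy)

theorem sortHandLabels_eq_dsOf (L : List String) :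
    sortHandLabels L = (dsOf L).map Prod.fst := by
  rw [sortHandLabels_eq_sorted]
  conv_lhs => rw [← map_fst_zipIdx L 0]
  rw [sorted_map Prod.fst encKey L.zipIdx, sorted_zipIdx_stable]

theorem dsOf_perm (L : List String) : (dsOf L).Perm L.zipIdx :=
  PySem.List.sorted_perm _ _ _

theorem KK_inj (L : List String) {a b : String × Nat} (ha : a ∈ L.zipIdx) (hb : b ∈ L.zipIdx)
    (h : KK a = KK b) : a = b := by
  obtain ⟨s, i⟩ := a; obtain ⟨t, j⟩ := b
  simp only [KK] at h
  obtain ⟨-, hij⟩ := Prod.mk.injEq .. ▸ toLex_inj.mp h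
  subst hij
  obtain ⟨-, -, hs⟩ := List.mem_zipIdx ha
  obtain ⟨-, -, ht⟩ := List.mem_zipIdx hb
  simp only [Nat.sub_zero] at hs ht
  rw [hs, ht]

theorem dsOf_pairwise (L : List String) :
    (dsOf L).Pairwise (fun a b => KK a < KK b) := by
  have hle : (dsOf L).Pairwise (fun a b => KK a ≤ KK b) := PySem.List.sorted_pairwise _ _
  have hnd : (dsOf L).Nodup :=
    ((dsOf_perm L).nodup_iff).mpr
      ((zipIdx_pairwise_snd L 0).imp (fun {a b} h he => by subst he; omega))
  refine (hle.and hnd).imp_of_mem ?_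
  intro a b ha hb hh
  rcases lt_or_eq_of_le hh.1 with h | h
  · exact h
  · exact absurd (KK_inj L ((dsOf_perm L).mem_iff.mp ha) ((dsOf_perm L).mem_iff.mp hb) h) hh.2

theorem filter_lt_eq_take {α κ : Type} [LinearOrder κ] (K : α → κ) (l : List α)
    (hp : l.Pairwise (fun a b => K a < K b)) (p : Nat) (hq : p < l.length) :
    l.filter (fun y => decide (K y < K l[p])) = l.take p := by
  have hpg := List.pairwise_iff_getElem.mp hp
  set v := l[p] with hv
  conv_lhs => rw [← List.take_append_drop p l]
  rw [List.filter_append]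
  have h1 : (l.take p).filter (fun y => decide (K y < K v)) = l.take p := by
    rw [List.filter_eq_self]
    intro a ha
    obtain ⟨q, hql, hqa⟩ := List.getElem_of_mem ha
    have hq2 : q < p := by simp only [List.length_take] at hql; omega
    have hget : (l.take p)[q] = l[q]'(by omega) := List.getElem_take
    rw [← hqa, hget, hv]
    exact decide_eq_true (hpg q p (by omega) hq hq2)
  have h2 : (l.drop p).filter (fun y => decide (K y < K v)) = [] := by
    rw [List.filter_eq_nil_iff]
    intro a ha
    obtain ⟨q, hql, hqa⟩ := List.getElem_of_mem ha
    have hql' : p + q < l.length := by simp only [List.length_drop] at hql; omega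
    have hget : (l.drop p)[q] = l[p + q]'hql' := List.getElem_drop ..
    rw [← hqa, hget, hv]
    simp only [Bool.not_eq_true, decide_eq_false_iff_not, not_lt]
    rcases Nat.eq_zero_or_pos q with rfl | hq0
    · simp
    · exact le_of_lt (hpg p (p + q) hq hql' (by omega))
  rw [h1, h2, List.append_nil]

-- the core: the slot A assigns to the i-th left tile is its stable rank
theorem idxOf_occTags_sorted (L : List String) (i : Nat) (hi : i < L.length) :
    (occTags ((dsOf L).map Prod.fst)).idxOf (L[i], ((L.take i).count L[i] : Int))
      = List.countP (fun y => decide (KK y < KK (L[i], i))) L.zipIdx := by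
  have hperm := dsOf_perm L
  have hpw := dsOf_pairwise L
  have hzi : i < L.zipIdx.length := by simpa using hi
  have hmem : ((L[i], i) : String × Nat) ∈ dsOf L := by
    rw [hperm.mem_iff]
    have h0 : L.zipIdx[i] = (L[i], i) := by simp [List.getElem_zipIdx]
    exact h0 ▸ List.getElem_mem hzi
  obtain ⟨p, hp, hdsp⟩ := List.getElem_of_mem hmem
  have hcount : List.countP (fun y => decide (KK y < KK (L[i], i))) L.zipIdx = p := by
    rw [← hperm.countP_eq, ← hdsp, List.countP_eq_length_filter,
        filter_lt_eq_take KK (dsOf L) hpw p hp, List.length_take]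
    omega
  have hplen : p < ((dsOf L).map Prod.fst).length := by simpa using hp
  have hfst : ((dsOf L).map Prod.fst)[p] = L[i] := by simp [hdsp]
  have hcnt : (((dsOf L).map Prod.fst).take p).count L[i] = (L.take i).count L[i] := by
    rw [← List.map_take, List.count_eq_countP, List.countP_map]
    have htake : (dsOf L).take p = (dsOf L).filter (fun y => decide (KK y < KK ((dsOf L)[p]))) :=
      (filter_lt_eq_take KK (dsOf L) hpw p hp).symm
    rw [htake, List.countP_filter, hperm.countP_eq, hdsp]
    rw [List.countP_congr (q := fun y => (y.1 == L[i]) && decide (y.2 < i)) ?hcg]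
    case hcg =>
      rintro ⟨s, j⟩ hy
      simp only [Function.comp_apply, Bool.and_eq_true, beq_iff_eq, decide_eq_true_eq,
        KK, Prod.Lex.toLex_lt_toLex]
      constructor
      · rintro ⟨rfl, h | ⟨-, h⟩⟩
        · exact absurd h (lt_irrefl _)
        · exact ⟨rfl, h⟩
      · rintro ⟨rfl, h⟩
        exact ⟨rfl, Or.inr ⟨rfl, h⟩⟩
    · -- split the index-decorated list at i
      rw [show L.zipIdx = (L.take i ++ L.drop i).zipIdx from by rw [List.take_append_drop],
          List.zipIdx_append, List.countP_append]
      have hti : (L.take i).length = i := by simp [List.length_take]; omega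
      have h2 : List.countP (fun y => (y.1 == L[i]) && decide (y.2 < i))
          ((L.drop i).zipIdx (0 + (L.take i).length)) = 0 := by
        rw [List.countP_eq_zero]
        rintro ⟨s, j⟩ hy
        obtain ⟨hk, -, -⟩ := List.mem_zipIdx hy
        rw [hti] at hk
        simp only [Bool.and_eq_true, decide_eq_true_eq, not_and]
        intro _
        omega
      have h1 : List.countP (fun y => (y.1 == L[i]) && decide (y.2 < i)) ((L.take i).zipIdx)
          = (L.take i).count L[i] := by
        rw [List.countP_congr (q := fun y => y.1 == L[i]) ?hcg1]
        case hcg1 =>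
          rintro ⟨s, j⟩ hy
          obtain ⟨-, hlt, -⟩ := List.mem_zipIdx hy
          rw [Nat.zero_add, hti] at hlt
          simp only [Bool.and_eq_true, beq_iff_eq, decide_eq_true_eq]
          constructor
          · rintro ⟨h, -⟩; exact h
          · intro h; exact ⟨h, hlt⟩
        · rw [List.count_eq_countP, ← map_fst_zipIdx (L.take i) 0, List.countP_map,
              map_fst_zipIdx]
          rfl
      rw [h1, h2, Nat.add_zero]
  have hoc : p < (occTags ((dsOf L).map Prod.fst)).length := by
    rw [length_occTags]; exact hplen
  have htag : (occTags ((dsOf L).map Prod.fst))[p] = (L[i], ((L.take i).count L[i] : Int)) := by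
    rw [getElem_occTags _ p hplen hoc, hfst, hcnt]
  have hnd := nodup_occTags ((dsOf L).map Prod.fst)
  have hmemT : (L[i], ((L.take i).count L[i] : Int)) ∈ occTags ((dsOf L).map Prod.fst) :=
    htag ▸ List.getElem_mem hoc
  have hlt := List.idxOf_lt_length_of_mem hmemT
  rw [hcount]
  exact hnd.getElem_inj_iff.mp (by rw [List.getElem_idxOf hlt, htag])

-- characterization of A's buckets fold
theorem buckets_aux (ts : List (String × Int)) :
    ∀ (k : Nat) (b : PySem.Dict (String × Int) (List Int)), ts.Nodup →
    ∀ t, ((PySem.List.enumerate ts (k : Int)).foldl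
        (fun (b : PySem.Dict (String × Int) (List Int)) p => b.insert p.2 (b.getD p.2 [] ++ [p.1])) b).getD t []
      = if t ∈ ts then b.getD t [] ++ [((k + ts.idxOf t : Nat) : Int)] else b.getD t [] := by
  induction ts with
  | nil => intro k b _ t; simp [PySem.List.enumerate]
  | cons x ts ih =>
    intro k b hnd t
    have hnx : x ∉ ts := (List.nodup_cons.mp hnd).1
    rw [show PySem.List.enumerate (x :: ts) (k : Int)
          = ((k : Int), x) :: PySem.List.enumerate ts ((k : Int) + 1) from rfl,
        List.foldl_cons,
        show ((k : Int) + 1) = ((k + 1 : Nat) : Int) from by push_cast; ring,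
        ih (k + 1) _ (List.nodup_cons.mp hnd).2 t]
    by_cases hx : t = x
    · subst hx
      rw [if_neg hnx, if_pos (List.mem_cons_self ..), PySem.Dict.getD_insert, if_pos rfl,
          List.idxOf_cons_self]
      simp
    · rw [PySem.Dict.getD_insert, if_neg hx]
      by_cases hmem : t ∈ ts
      · rw [if_pos hmem, if_pos (List.mem_cons_of_mem _ hmem)]
        congr 2
        rw [List.idxOf_cons_ne _ (fun h => hx h.symm)]
        omega
      · rw [if_neg hmem, if_neg (by simp [hx, hmem])]

theorem take_set_succ (acc : List Int) (k : Nat) (v : Int) (hk : k < acc.length) :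
    (acc.set k v).take (k + 1) = acc.take k ++ [v] := by
  rw [List.set_eq_take_append_cons_drop, if_pos hk]
  have hlt : (acc.take k).length = k := by simp [List.length_take]; omega
  rw [show k + 1 = (acc.take k).length + 1 from by omega, List.take_append]
  simp

-- characterization of A's final fold
theorem final_char (g : String × Int → Int) (ts : List (String × Int)) :
    ∀ (k : Nat) (b : PySem.Dict (String × Int) (List Int)) (acc : List Int), ts.Nodup →
    (∀ t ∈ ts, b.getD t [] = [g t]) → acc.length = k + ts.length →
    ((PySem.List.enumerate ts (k : Int)).foldl
        (fun (st : PySem.Dict (String × Int) (List Int) × List Int) p =>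
          let q := st.1.getD p.2 []
          (st.1.insert p.2 q.tail, st.2.set p.1.toNat (q.headD 0)))
        (b, acc)).2
      = acc.take k ++ ts.map g := by
  induction ts with
  | nil =>
    intro k b acc _ _ hlen
    have : acc.take k = acc := List.take_of_length_le (by simp at hlen; omega)
    simp [PySem.List.enumerate, this]
  | cons x ts ih =>
    intro k b acc hnd hb hlen
    have hnx : x ∉ ts := (List.nodup_cons.mp hnd).1
    have hq : b.getD x [] = [g x] := hb x (List.mem_cons_self ..)
    rw [show PySem.List.enumerate (x :: ts) (k : Int)
          = ((k : Int), x) :: PySem.List.enumerate ts ((k : Int) + 1) from rfl,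
        List.foldl_cons,
        show ((k : Int) + 1) = ((k + 1 : Nat) : Int) from by push_cast; ring]
    simp only [hq, List.tail_cons, List.headD_cons, Int.toNat_natCast]
    rw [ih (k + 1) (b.insert x []) (acc.set k (g x)) (List.nodup_cons.mp hnd).2 ?hb' ?hlen']
    case hb' =>
      intro t ht
      rw [PySem.Dict.getD_insert, if_neg (fun h : t = x => hnx (h ▸ ht))]
      exact hb t (List.mem_cons_of_mem _ ht)
    case hlen' =>
      simp only [List.length_set]
      simp at hlen ⊢
      omega
    rw [take_set_succ acc k (g x) (by simp at hlen; omega)]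
    simp

-- count of L[i] in the first i elements is less than its total count
theorem count_take_lt (L : List String) (i : Nat) (hi : i < L.length) :
    (L.take i).count L[i] < L.count L[i] := by
  have hsub : (L.take (i + 1)).Sublist L := List.take_sublist _ _
  have hc := hsub.count_le L[i]
  rw [List.take_add_one, List.getElem?_eq_getElem hi] at hc
  simp only [Option.toList_some, List.count_append, List.count_singleton, beq_self_eq_true,
    if_true] at hc
  omega

theorem perm_sortHandLabels (L : List String) : (sortHandLabels L).Perm L := by
  rw [sortHandLabels_eq_dsOf]
  have h := (dsOf_perm L).map Prod.fst
  rwa [map_fst_zipIdx] at h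

theorem length_sortHandLabels (L : List String) : (sortHandLabels L).length = L.length :=
  (perm_sortHandLabels L).length_eq

-- A computes: map each source tag to its position among the target tags
theorem A_char (xs : List String) (h2 : 2 ≤ xs.length) (hne : xs ≠ []) :
    screen_slot_indices_from_hand xs
      = (occTags xs).map
          (fun t => (((occTags (sortHandLabels xs.dropLast ++ [xs.getLast hne])).idxOf t : Nat) : Int)) := by
  simp only [screen_slot_indices_from_hand]
  rw [if_neg (by omega), if_neg (by omega), PySem.List.slice_to_neg_one,
      PySem.List.pyGetD_neg_one xs "" hne, epTags_eq_occTags, epTags_eq_occTags]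
  have hpermT : (occTags xs).Perm (occTags (sortHandLabels xs.dropLast ++ [xs.getLast hne])) := by
    apply occTags_perm
    conv_lhs => rw [← List.dropLast_append_getLast hne]
    exact (perm_sortHandLabels xs.dropLast).symm.append_right _
  have hb0 := buckets_aux (occTags (sortHandLabels xs.dropLast ++ [xs.getLast hne])) 0
      PySem.Dict.empty (nodup_occTags _)
  simp only [Nat.cast_zero, Nat.zero_add] at hb0
  have hmain := final_char
      (fun t => (((occTags (sortHandLabels xs.dropLast ++ [xs.getLast hne])).idxOf t : Nat) : Int))
      (occTags xs) 0
      ((PySem.List.enumerate (occTags (sortHandLabels xs.dropLast ++ [xs.getLast hne]))).foldl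
        (fun (b : PySem.Dict (String × Int) (List Int)) p => b.insert p.2 (b.getD p.2 [] ++ [p.1]))
        PySem.Dict.empty)
      (List.replicate xs.length 0) (nodup_occTags xs) ?hb ?hlen
  case hb =>
    intro t ht
    rw [hb0 t, if_pos (hpermT.mem_iff.mp ht)]
    simp [PySem.Dict.getD, PySem.Dict.get?_empty]
  case hlen =>
    simp [length_occTags]
  simpa using hmain

-- B computes: the stable-rank count for every left tile, then n-1 for the draw
theorem B_char (xs : List String) (h2 : 2 ≤ xs.length) :
    screen_slot_indices_from_hand_alt xs
      = (xs.dropLast.zipIdx.map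
          (fun p => (List.countP (fun y => decide (KK y < KK p)) xs.dropLast.zipIdx : Int)))
        ++ [(xs.length : Int) - 1] := by
  simp only [screen_slot_indices_from_hand_alt]
  rw [if_neg (by omega), if_neg (by omega), PySem.List.slice_to_neg_one,
      PySem.List.foldl_append_singleton_eq_map, List.nil_append]
  congr 1
  have hz : PySem.List.enumerate (xs.dropLast.map tileKey)
      = ((xs.dropLast.map tileKey).zipIdx).map (fun p => ((p.2 : Int), p.1)) := by
    have := enumerate_eq_zipIdx (xs.dropLast.map tileKey) 0
    simpa using this
  rw [hz, List.zipIdx_map, List.map_map, List.map_map]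
  apply List.map_congr_left
  rintro ⟨s, j⟩ hy
  simp only [Function.comp_apply, Prod.map_fst, Prod.map_snd, id_eq]
  have hfold : ∀ (ki : Int × Int) (jj : Int) (l : List (Int × (Int × Int))),
      l.foldl (fun (slot : Int) q =>
          if toLex q.2 < toLex ki ∨ (q.2 = ki ∧ q.1 < jj) then slot + 1 else slot) 0
        = ((l.countP (fun q => decide (toLex q.2 < toLex ki ∨ (q.2 = ki ∧ q.1 < jj)))) : Int) := by
    intro ki jj l
    rw [PySem.List.foldl_ite_add_one
          (p := fun q : Int × (Int × Int) => toLex q.2 < toLex ki ∨ (q.2 = ki ∧ q.1 < jj)),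
        zero_add]
  refine (hfold (tileKey s) (j : Int) _).trans ?_
  congr 1
  rw [List.map_map, List.countP_map]
  apply List.countP_congr
  rintro ⟨t, jy⟩ hmem
  simp only [Function.comp_apply, Prod.map_fst, Prod.map_snd, id_eq, decide_eq_true_eq,
    KK, encKey, Prod.Lex.toLex_lt_toLex]
  constructor
  · rintro (h | ⟨he, hj⟩)
    · exact Or.inl h
    · exact Or.inr ⟨toLex_inj.mpr he ▸ rfl, by exact_mod_cast hj⟩
  · rintro (h | ⟨he, hj⟩)
    · exact Or.inl h
    · exact Or.inr ⟨toLex_inj.mp he, by exact_mod_cast hj⟩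

theorem main_eq (xs : List String) :
    screen_slot_indices_from_hand xs = screen_slot_indices_from_hand_alt xs := by
  by_cases h0 : xs.length = 0
  · rw [List.length_eq_zero_iff.mp h0]; rfl
  by_cases h1 : xs.length = 1
  · simp only [screen_slot_indices_from_hand, screen_slot_indices_from_hand_alt]
    rw [if_neg h0, if_pos h1, if_neg h0, if_pos h1]
  have h2 : 2 ≤ xs.length := by omega
  have hne : xs ≠ [] := fun h => h0 (by rw [h]; rfl)
  rw [A_char xs h2 hne, B_char xs h2]
  have hxsplit : occTags xs
      = occTags xs.dropLast
        ++ [(xs.getLast hne, (xs.dropLast.count (xs.getLast hne) : Int))] := by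
    conv_lhs => rw [← List.dropLast_append_getLast hne]
    exact occTags_append _ _
  rw [hxsplit, List.map_append]
  have hTsplit : occTags (sortHandLabels xs.dropLast ++ [xs.getLast hne])
      = occTags (sortHandLabels xs.dropLast)
        ++ [(xs.getLast hne, ((sortHandLabels xs.dropLast).count (xs.getLast hne) : Int))] :=
    occTags_append _ _
  have hcntdraw : (sortHandLabels xs.dropLast).count (xs.getLast hne)
      = xs.dropLast.count (xs.getLast hne) := (perm_sortHandLabels _).count_eq _
  congr 1
  · -- the n-1 left tiles
    apply List.ext_getElem
    · simp [length_occTags]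
    intro i h1i h2i
    have hi : i < xs.dropLast.length := by
      simpa [length_occTags] using h1i
    rw [List.getElem_map, List.getElem_map,
        getElem_occTags _ i hi (by rwa [length_occTags]), List.getElem_zipIdx]
    have hcnt_any : ∀ a, (sortHandLabels xs.dropLast).count a = xs.dropLast.count a :=
      fun a => (perm_sortHandLabels _).count_eq a
    have hmemS : (xs.dropLast[i], ((xs.dropLast.take i).count xs.dropLast[i] : Int))
        ∈ occTags (sortHandLabels xs.dropLast) := by
      rw [mem_occTags, hcnt_any]
      exact ⟨Int.natCast_nonneg _, by exact_mod_cast count_take_lt xs.dropLast i hi⟩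
    rw [hTsplit, List.idxOf_append, if_pos hmemS, sortHandLabels_eq_dsOf,
        idxOf_occTags_sorted xs.dropLast i hi]
    simp
  · -- the draw
    simp only [List.map_cons, List.map_nil]
    congr 1
    rw [hTsplit, hcntdraw, List.idxOf_append]
    rw [if_neg ?notmem]
    case notmem =>
      rw [mem_occTags, hcntdraw]
      omega
    rw [List.idxOf_cons_self, Nat.zero_add, length_occTags, length_sortHandLabels,
        List.length_dropLast]
    omega

-- ===== VERDICT (by name: the statement is the Claim_ definition above) =====
theorem screen_slot_indices_from_hand_spec : Claim_equal_screen_slot_indices_from_hand := by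
  intro xs _
  unfold Spec_screen_slot_indices_from_hand
  exact main_eq xs
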